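-- pv_equiv track=rewrite | github.com/dhwpdnr/coding_test | programmers/2301/230113_4.py | solution
-- ===== SOURCE A (Python) =====
-- def solution(n, s):
--     answer = []
--     if s < n:
--         answer = [-1]
--     else :
--         k = s // n
--         for i in range(n):
--             answer.append(k)
--         a = s % n
--         for t in range(a):
--             answer[t] = answer[t] + 1
--         answer.sort()
--     return answer
-- ===== SOURCE B (Python) =====
-- def solution(n, s):
--     if s < n:
--         return [-1]
--     answer = []
--     parts, rem = n, s
--     while parts > 0:
--         q = rem // parts
--         answer.append(q)
--         rem -= q
--         parts -= 1
--     return answer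
-- ===== Notes on version B (the rewrite author's own statement) =====
-- stated objective: alternative
-- what changed: B greedily computes each part as rem // parts-left, subtracting it from the remaining sum, in one pass with no increment pass and no sort; the greedy floor divisions provably emit the sorted fair split directly.
import Mathlib
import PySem

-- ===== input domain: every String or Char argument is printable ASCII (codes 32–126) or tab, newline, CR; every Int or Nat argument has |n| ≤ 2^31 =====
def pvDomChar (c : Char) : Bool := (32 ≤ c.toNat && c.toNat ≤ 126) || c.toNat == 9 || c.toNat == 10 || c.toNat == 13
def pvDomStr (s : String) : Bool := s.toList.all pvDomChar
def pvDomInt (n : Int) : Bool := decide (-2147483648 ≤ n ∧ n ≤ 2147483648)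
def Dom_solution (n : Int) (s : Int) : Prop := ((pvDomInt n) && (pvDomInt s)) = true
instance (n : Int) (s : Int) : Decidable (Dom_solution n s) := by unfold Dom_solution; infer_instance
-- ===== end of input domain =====

-- B replaces A's build-increment-sort passes by a single greedy pass: each part is
-- rem // parts-left, subtracted from the remaining sum; the result comes out sorted by itself.

-- ===== PORT A =====
def solution (n : Int) (s : Int) : List Int :=
  if s < n then [-1]
  else
    let k := PySem.Int.floordiv s n
    let answer := (PySem.List.pyRange 0 n 1).foldl (fun acc _ => acc ++ [k]) []
    let a := PySem.Int.mod s n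
    let answer := (PySem.List.pyRange 0 a 1).foldl
      (fun acc t => PySem.List.pySetD acc t (PySem.List.pyGetD acc t 0 + 1)) answer
    PySem.List.sorted answer (fun x => x) false

-- ===== PORT B =====
-- the while loop: 'parts' strictly decreases to 0, so it runs exactly parts.toNat times
def greedyAux : Nat → Int → Int → List Int
  | 0, _, _ => []
  | f + 1, parts, rem =>
      let q := PySem.Int.floordiv rem parts
      q :: greedyAux f (parts - 1) (rem - q)

def solution_alt (n : Int) (s : Int) : List Int :=
  if s < n then [-1]
  else greedyAux n.toNat n s

-- ===== PRECONDITION & SPEC =====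
-- Pre_ excludes exactly the inputs where Python A raises ZeroDivisionError: n = 0 with s ≥ n.
def Pre_solution (n : Int) (s : Int) : Prop := n ≠ 0 ∨ s < n
instance (n : Int) (s : Int) : Decidable (Pre_solution n s) := by unfold Pre_solution; infer_instance
def pvWitness_solution : Int × Int := (3, 7)

def Spec_solution (n : Int) (s : Int) (out : List Int) : Prop := out = solution_alt n s
instance (n : Int) (s : Int) (out : List Int) : Decidable (Spec_solution n s out) := by unfold Spec_solution; infer_instance

-- ===== CLAIM (what is proved, stated in full; the proofs are below) =====
def Claim_equal_solution : Prop := ∀ (n : Int) (s : Int), Dom_solution n s → Pre_solution n s → Spec_solution n s (solution n s)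

-- ===== LEMMAS AND PROOFS =====

-- A's increment loop: after j steps, the first j entries of 'replicate m k' are k+1.
lemma incr_loop (k : Int) (m j : Nat) (hj : j ≤ m) :
    (PySem.List.pyRange 0 (j : Int) 1).foldl
      (fun acc t => PySem.List.pySetD acc t (PySem.List.pyGetD acc t 0 + 1))
      (List.replicate m k)
    = List.replicate j (k + 1) ++ List.replicate (m - j) k := by
  induction j with
  | zero => simp [PySem.List.pyRange_one_eq_nil]
  | succ j ih =>
    have hj' : j ≤ m := Nat.le_of_succ_le hj
    have hcast : ((j + 1 : Nat) : Int) = (j : Int) + 1 := by push_cast; ring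
    rw [hcast, PySem.List.pyRange_one_succ_right (by positivity), List.foldl_append, ih hj']
    have hlt : j < m := hj
    obtain ⟨r, hr⟩ : ∃ r, m - j = r + 1 := ⟨m - j - 1, by omega⟩
    have hget : PySem.List.pyGetD (List.replicate j (k+1) ++ List.replicate (m - j) k) (j : Int) 0 = k := by
      rw [hr]
      simp [List.replicate_succ]
    simp only [List.foldl_cons, List.foldl_nil, hget]
    rw [PySem.List.pySetD_natCast, hr, List.replicate_succ]
    have : m - (j + 1) = r := by omega
    rw [this]
    rw [show j = (List.replicate j (k+1)).length by simp]
    rw [List.set_append_right _ _ (by simp)]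
    simp [List.replicate_succ' (n := j)]

-- A's build loop produces n copies of k.
lemma build_loop (k n : Int) :
    (PySem.List.pyRange 0 n 1).foldl (fun acc _ => acc ++ [k]) []
    = List.replicate n.toNat k := by
  rw [PySem.List.foldl_append_singleton_eq_map]
  exact List.eq_replicate_iff.mpr ⟨by simp [PySem.List.length_pyRange_one], by simp⟩

-- A's value on the nontrivial branch, in canonical form.
lemma solution_canon (n s : Int) (hs : ¬ s < n) (hpos : 0 < n) :
    solution n s
    = List.replicate (n.toNat - (PySem.Int.mod s n).toNat) (PySem.Int.floordiv s n)
      ++ List.replicate (PySem.Int.mod s n).toNat (PySem.Int.floordiv s n + 1) := by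
  unfold solution
  simp only [hs, if_false]
  set k := PySem.Int.floordiv s n with hk
  set a := PySem.Int.mod s n with ha
  rw [build_loop]
  have h0 : 0 ≤ a := by rw [ha]; exact PySem.Int.mod_nonneg _ hpos
  have h1 : a < n := by rw [ha]; exact PySem.Int.mod_lt _ hpos
  have hle : a.toNat ≤ n.toNat := by omega
  rw [show (PySem.List.pyRange 0 a 1) = (PySem.List.pyRange 0 ((a.toNat : Int)) 1) by
    rw [Int.toNat_of_nonneg h0]]
  rw [incr_loop k n.toNat a.toNat hle]
  have hperm : (List.replicate (n.toNat - a.toNat) k ++ List.replicate a.toNat (k+1)).Perm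
      (List.replicate a.toNat (k+1) ++ List.replicate (n.toNat - a.toNat) k) :=
    List.perm_append_comm
  have hpw : (List.replicate (n.toNat - a.toNat) k ++ List.replicate a.toNat (k+1)).Pairwise (· ≤ ·) := by
    apply List.pairwise_append.mpr
    refine ⟨List.pairwise_replicate.mpr (by simp), List.pairwise_replicate.mpr (by simp), ?_⟩
    intro x hx y hy
    rw [List.eq_of_mem_replicate hx, List.eq_of_mem_replicate hy]; omega
  rw [PySem.List.sorted_id_eq_of_perm_of_pairwise _ _ hperm hpw]

-- B's greedy loop on a fair-split input (m parts, sum m*k + a with a ≤ m) emits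
-- (m - a) copies of k followed by a copies of k + 1.
lemma greedy_eq (m : Nat) (a : Nat) (k : Int) (ha : a ≤ m) :
    greedyAux m (m : Int) ((m : Int) * k + (a : Int))
    = List.replicate (m - a) k ++ List.replicate a (k + 1) := by
  induction m generalizing a k with
  | zero =>
    have : a = 0 := by omega
    subst this
    simp [greedyAux]
  | succ m ih =>
    by_cases hcase : a = m + 1
    · subst hcase
      have hq : PySem.Int.floordiv (((m+1 : Nat) : Int) * k + ((m+1 : Nat) : Int)) ((m+1 : Nat) : Int) = k + 1 := by
        rw [PySem.Int.floordiv_eq_iff_of_pos (by push_cast; omega)]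
        push_cast; constructor <;> nlinarith
      simp only [greedyAux, hq]
      have harg : ((m+1 : Nat) : Int) * k + ((m+1 : Nat) : Int) - (k + 1) = ((m : Nat) : Int) * (k + 1) + ((0 : Nat) : Int) := by
        push_cast; ring
      have hparts : ((m+1 : Nat) : Int) - 1 = ((m : Nat) : Int) := by push_cast; ring
      rw [hparts, harg, ih 0 (k+1) (Nat.zero_le _)]
      simp [List.replicate_succ]
    · have ha' : a ≤ m := by omega
      have hq : PySem.Int.floordiv (((m+1 : Nat) : Int) * k + (a : Int)) ((m+1 : Nat) : Int) = k := by
        rw [PySem.Int.floordiv_eq_iff_of_pos (by push_cast; omega)]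
        push_cast
        constructor <;> nlinarith [Int.natCast_nonneg a, show ((a : Int)) < (m : Int) + 1 by exact_mod_cast Nat.lt_succ_of_le ha']
      simp only [greedyAux, hq]
      have harg : ((m+1 : Nat) : Int) * k + (a : Int) - k = ((m : Nat) : Int) * k + (a : Int) := by
        push_cast; ring
      have hparts : ((m+1 : Nat) : Int) - 1 = ((m : Nat) : Int) := by push_cast; ring
      rw [hparts, harg, ih a k ha']
      have : m + 1 - a = (m - a) + 1 := by omega
      rw [this, List.replicate_succ]
      simp

-- ===== VERDICT (by name: the statement is the Claim_ definition above) =====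
theorem solution_spec : Claim_equal_solution := by
  intro n s _ hpre
  unfold Spec_solution
  by_cases hs : s < n
  · unfold solution solution_alt; simp [hs]
  · have hn : n ≠ 0 := by
      rcases hpre with h | h
      · exact h
      · exact absurd h hs
    rcases lt_or_gt_of_ne hn with hneg | hpos
    · -- n < 0: A returns [] (all loops empty), B's loop runs zero times
      have hA : solution n s = [] := by
        unfold solution
        simp only [hs, if_false]
        have hb := PySem.Int.mod_neg_bounds (a := s) hneg
        have h1 : n.toNat = 0 := by omega
        have h2 : PySem.List.pyRange 0 (PySem.Int.mod s n) 1 = [] :=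
          PySem.List.pyRange_one_eq_nil (by omega)
        rw [build_loop, h1, h2]
        simp [PySem.List.sorted]
      have hB : solution_alt n s = [] := by
        unfold solution_alt
        simp only [hs, if_false]
        have h1 : n.toNat = 0 := by omega
        rw [h1]; rfl
      rw [hA, hB]
    · -- n > 0: both sides equal the canonical sorted fair split
      set k := PySem.Int.floordiv s n with hk
      set a := PySem.Int.mod s n with ha
      have h0 : 0 ≤ a := by rw [ha]; exact PySem.Int.mod_nonneg _ hpos
      have h1 : a < n := by rw [ha]; exact PySem.Int.mod_lt _ hpos
      have hsum : k * n + a = s := by rw [hk, ha]; exact PySem.Int.floordiv_mul_add_mod s n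
      have hB : solution_alt n s
          = List.replicate (n.toNat - a.toNat) k ++ List.replicate a.toNat (k + 1) := by
        unfold solution_alt
        simp only [hs, if_false]
        have hn' : ((n.toNat : Nat) : Int) = n := Int.toNat_of_nonneg (le_of_lt hpos)
        have ha' : ((a.toNat : Nat) : Int) = a := Int.toNat_of_nonneg h0
        have hG := greedy_eq n.toNat a.toNat k (by omega)
        rw [hn', ha'] at hG
        rw [show n * k + a = s by rw [mul_comm]; exact hsum] at hG
        exact hG
      rw [solution_canon n s hs hpos, hB]
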